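-- pv_equiv track=rewrite | github.com/darakna/Playground | Pyton_stuff/Work/Parse_log_files2.py | stripall
-- ===== SOURCE A (Python) =====
-- domain_char_list=list(range(0,127))
--
-- def stripall(word):
--     if word=="":
--         return ""
--     else:
--         if ord(word[0]) in domain_char_list:
--             return word[0]+stripall(word[1:])
--         else:
--              return stripall(word[1:])
-- ===== SOURCE B (Python) =====
-- def stripall(word):
--     acc = []
--     for c in word:
--         if 0 <= ord(c) <= 126:
--             acc.append(c)
--     return "".join(acc)
-- ===== Notes on version B (the rewrite author's own statement) =====
-- stated objective: faster
-- what changed: Replaces the recursion with per-call string slicing and a membership scan of a 127-element list by a single iterative pass with an accumulator and a constant-time range comparison.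
import Mathlib
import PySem

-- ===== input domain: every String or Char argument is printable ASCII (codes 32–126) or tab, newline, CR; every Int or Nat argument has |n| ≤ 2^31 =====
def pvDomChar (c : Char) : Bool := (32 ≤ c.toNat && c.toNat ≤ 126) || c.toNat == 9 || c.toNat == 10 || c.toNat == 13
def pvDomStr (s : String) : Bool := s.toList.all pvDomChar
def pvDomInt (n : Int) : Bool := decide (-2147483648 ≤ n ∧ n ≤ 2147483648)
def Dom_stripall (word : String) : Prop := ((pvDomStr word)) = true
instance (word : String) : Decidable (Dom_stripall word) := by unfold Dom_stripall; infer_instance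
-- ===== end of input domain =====

-- B is an iterative single pass with an accumulator and a range comparison, instead of A's recursion with slicing and a list-membership scan.

-- ===== PORT A =====
-- module-level constant: domain_char_list = list(range(0, 127))
def domainCharList : List Int := PySem.List.pyRange 0 127 1

-- recursion on the character list (word[0] = head, word[1:] = tail)
def stripallChars : List Char → List Char
  | [] => []
  | c :: rest =>
    if domainCharList.contains ((c.toNat : Int)) then
      c :: stripallChars rest
    else
      stripallChars rest

def stripall (word : String) : String := String.mk (stripallChars word.toList)

-- ===== PORT B =====
-- for c in word: if 0 <= ord(c) <= 126: acc.append(c); return "".join(acc)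
def stripall_alt (word : String) : String :=
  String.mk (word.toList.foldl
    (fun acc c => if 0 ≤ (c.toNat : Int) ∧ (c.toNat : Int) ≤ 126 then acc ++ [c] else acc) [])

-- ===== PRECONDITION & SPEC =====
def Spec_stripall (word : String) (out : String) : Prop := out = stripall_alt word
instance (word : String) (out : String) : Decidable (Spec_stripall word out) := by unfold Spec_stripall; infer_instance

-- ===== CLAIM (what is proved, stated in full; the proofs are below) =====
def Claim_equal_stripall : Prop := ∀ (word : String), Dom_stripall word → Spec_stripall word (stripall word)

-- ===== LEMMAS AND PROOFS =====
theorem mem_domainCharList (n : Int) : domainCharList.contains n = decide (0 ≤ n ∧ n ≤ 126) := by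
  rw [Bool.eq_iff_iff]
  simp [domainCharList, PySem.List.mem_pyRange_one]
  omega

theorem foldl_acc (cs : List Char) (acc : List Char) :
    cs.foldl (fun acc c => if 0 ≤ (c.toNat : Int) ∧ (c.toNat : Int) ≤ 126 then acc ++ [c] else acc) acc
      = acc ++ stripallChars cs := by
  induction cs generalizing acc with
  | nil => simp [stripallChars]
  | cons c rest ih =>
    rw [List.foldl_cons]
    unfold stripallChars
    rw [mem_domainCharList]
    by_cases h : 0 ≤ (c.toNat : Int) ∧ (c.toNat : Int) ≤ 126
    · rw [if_pos h, if_pos (by simpa using h), ih]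
      simp
    · rw [if_neg h, if_neg (by simpa using h), ih]

-- ===== VERDICT (by name: the statement is the Claim_ definition above) =====
theorem stripall_spec : Claim_equal_stripall := by
  intro word _
  unfold Spec_stripall stripall stripall_alt
  rw [foldl_acc]
  simp
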